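-- pv_equiv track=rewrite | github.com/mrollier/essential-metrics-life-on-graphs | src/essential_metrics_life_on_graphs/rules.py | eca_is_llna
-- ===== SOURCE A (Python) =====
-- def eca_is_llna(eca:int) -> bool:
--     if not _is_eca(eca):
--         raise ValueError(f"ECA '{eca}' is not recognised as an elementary cellular automaton. Choose an integer from 0 to 255.")
--     # make list of all totalistic ECAs
--     llna_ecas = []
--     for b7 in [0,1]:
--         for b6 in [0,1]:
--             b3 = b6
--             for b5 in [0,1]:
--                 for b4 in [0,1]:
--                     b1=b4
--                     for b2 in [0,1]:
--                         for b0 in [0,1]: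
--                             llna_eca = 2**7*b7 + 2**6*b6 + 2**5*b5 + 2**4*b4 + 2**3*b3 + 2**2*b2 + 2**1*b1 + 2**0*b0
--                             llna_ecas.append(llna_eca)
--     if eca in llna_ecas:
--         return True
--     return False
--
-- def _is_eca(eca:int):
--     # Check whether eca is a valid integer in [0, 255]
--     if eca < 0:
--         return False
--     if eca > 255:
--         return False
--     return True
-- ===== SOURCE B (Python) =====
-- def eca_is_llna(eca: int) -> bool:
--     if not _is_eca(eca):
--         raise ValueError(f"ECA '{eca}' is not recognised as an elementary cellular automaton. Choose an integer from 0 to 255.")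
--     # LLNA/totalistic constraint: bit3 == bit6 and bit1 == bit4
--     return (eca // 8) % 2 == (eca // 64) % 2 and (eca // 2) % 2 == (eca // 16) % 2
--
--
-- def _is_eca(eca: int):
--     return 0 <= eca <= 255
-- ===== Notes on version B (the rewrite author's own statement) =====
-- stated objective: simpler
-- what changed: Replaced the six nested loops that enumerate all 64 LLNA rule numbers followed by a list membership test with a closed-form bit check (bit3 == bit6 and bit1 == bit4) computed directly from eca.
import Mathlib
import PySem

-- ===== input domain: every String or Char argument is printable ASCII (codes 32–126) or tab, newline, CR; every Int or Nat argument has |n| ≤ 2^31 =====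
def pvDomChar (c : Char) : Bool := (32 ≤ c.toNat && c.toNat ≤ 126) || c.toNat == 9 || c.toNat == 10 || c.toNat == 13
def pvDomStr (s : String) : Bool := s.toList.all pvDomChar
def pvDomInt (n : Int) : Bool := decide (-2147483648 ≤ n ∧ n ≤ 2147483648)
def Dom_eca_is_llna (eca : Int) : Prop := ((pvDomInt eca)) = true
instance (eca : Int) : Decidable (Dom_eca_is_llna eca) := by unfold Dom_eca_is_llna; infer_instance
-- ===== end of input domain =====

-- B replaces A's six nested loops enumerating all 64 LLNA rule numbers (and the list
-- membership test) with a closed-form bit check (bit3 == bit6 and bit1 == bit4): simpler.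


-- ===== PORT A =====
-- literal transliteration of A's nested loops building llna_ecas, then membership test
def eca_is_llna (eca : Int) : Bool :=
  -- _is_eca guard: the raise on failure is excluded by Pre_eca_is_llna
  let llna_ecas : List Int :=
    ([0, 1] : List Int).foldl (fun acc b7 =>
      ([0, 1] : List Int).foldl (fun acc b6 =>
        let b3 := b6
        ([0, 1] : List Int).foldl (fun acc b5 =>
          ([0, 1] : List Int).foldl (fun acc b4 =>
            let b1 := b4
            ([0, 1] : List Int).foldl (fun acc b2 =>
              ([0, 1] : List Int).foldl (fun acc b0 =>
                let llna_eca := 2^7*b7 + 2^6*b6 + 2^5*b5 + 2^4*b4 + 2^3*b3 + 2^2*b2 + 2^1*b1 + 2^0*b0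
                acc ++ [llna_eca]) acc) acc) acc) acc) acc) []
  if llna_ecas.contains eca then true else false

-- ===== PORT B =====
def eca_is_llna_alt (eca : Int) : Bool :=
  -- closed form: bit3 == bit6 and bit1 == bit4 (Python // and % via PySem)
  decide (PySem.Int.mod (PySem.Int.floordiv eca 8) 2 = PySem.Int.mod (PySem.Int.floordiv eca 64) 2)
  && decide (PySem.Int.mod (PySem.Int.floordiv eca 2) 2 = PySem.Int.mod (PySem.Int.floordiv eca 16) 2)

-- ===== PRECONDITION & SPEC =====
-- A raises ValueError exactly when eca is outside [0, 255]
def Pre_eca_is_llna (eca : Int) : Prop := 0 ≤ eca ∧ eca ≤ 255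
instance (eca : Int) : Decidable (Pre_eca_is_llna eca) := by unfold Pre_eca_is_llna; infer_instance
def pvWitness_eca_is_llna : Int := 90

def Spec_eca_is_llna (eca : Int) (out : Bool) : Prop := out = eca_is_llna_alt eca
instance (eca : Int) (out : Bool) : Decidable (Spec_eca_is_llna eca out) := by unfold Spec_eca_is_llna; infer_instance

-- ===== CLAIM (what is proved, stated in full; the proofs are below) =====
def Claim_equal_eca_is_llna : Prop := ∀ (eca : Int), Dom_eca_is_llna eca → Pre_eca_is_llna eca → Spec_eca_is_llna eca (eca_is_llna eca)

-- ===== LEMMAS AND PROOFS =====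
set_option maxRecDepth 4096 in
theorem eca_is_llna_key : ∀ n : Fin 256, eca_is_llna (n.val : Int) = eca_is_llna_alt (n.val : Int) := by
  decide

-- ===== VERDICT (by name: the statement is the Claim_ definition above) =====
theorem eca_is_llna_spec : Claim_equal_eca_is_llna := by
  intro eca _ hpre
  obtain ⟨h0, h1⟩ := hpre
  have hn : eca = ((eca.toNat : Nat) : Int) := by omega
  have hov : eca.toNat < 256 := by omega
  rw [Spec_eca_is_llna, hn]
  exact (eca_is_llna_key ⟨eca.toNat, hov⟩)
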